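-- pv_equiv track=rewrite | github.com/euljiuniv/study0 | 최소호가단위.py | get_tick_size
-- ===== SOURCE A (Python) =====
-- def get_tick_size(price):
--     tick_sizes = {
--         2000: 1,
--         5000: 5,
--         10000: 10,
--         20000: 10,
--         50000: 50,
--         100000: 100,
--         200000: 100,
--     }
--     for limit in sorted(tick_sizes.keys()):
--         if price < limit:
--             return tick_sizes[limit]
--     return 500
-- ===== SOURCE B (Python) =====
-- def get_tick_size(price):
--     thresholds = [2000, 5000, 10000, 20000, 50000, 100000, 200000]
--     values = [1, 5, 10, 10, 50, 100, 100, 500]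
--     lo, hi = 0, len(thresholds)
--     while lo < hi:
--         mid = (lo + hi) // 2
--         if price < thresholds[mid]:
--             hi = mid
--         else:
--             lo = mid + 1
--     return values[lo]
-- ===== Notes on version B (the rewrite author's own statement) =====
-- stated objective: alternative
-- what changed: Replaces A's dict build + sorted() + linear scan over thresholds with a hand-written binary search over a parallel threshold/value table whose last entry carries the fallback tick.
import Mathlib
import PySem

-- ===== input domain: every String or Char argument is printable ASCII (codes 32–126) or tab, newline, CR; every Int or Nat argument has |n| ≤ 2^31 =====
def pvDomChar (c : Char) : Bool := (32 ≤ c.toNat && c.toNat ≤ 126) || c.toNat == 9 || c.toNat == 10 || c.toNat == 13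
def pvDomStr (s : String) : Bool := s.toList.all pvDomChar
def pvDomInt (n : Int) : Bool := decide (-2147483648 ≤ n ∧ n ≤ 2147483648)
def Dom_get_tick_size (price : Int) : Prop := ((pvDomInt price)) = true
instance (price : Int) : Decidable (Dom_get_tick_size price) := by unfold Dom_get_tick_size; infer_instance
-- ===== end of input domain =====

-- B replaces A's dict + sorted() + linear scan with a hand-written binary search over a parallel table (alternative decomposition, same results).
-- ===== PORT A =====
-- A: build dict, iterate sorted keys, return value at first key with price < key, else 500
def tickLoop (price : Int) (d : PySem.Dict Int Int) : List Int → Int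
  | [] => 500
  | l :: ls => if price < l then (PySem.Dict.get? d l).getD 0 else tickLoop price d ls

def get_tick_size (price : Int) : Int :=
  let tick_sizes : PySem.Dict Int Int := PySem.Dict.ofList
    [(2000, 1), (5000, 5), (10000, 10), (20000, 10), (50000, 50), (100000, 100), (200000, 100)]
  tickLoop price tick_sizes (PySem.List.sorted (PySem.Dict.keys tick_sizes) id)

-- ===== PORT B =====
-- B: binary search (while lo < hi) for the first threshold strictly greater than price
-- fuel = list length bounds the iteration count of the while loop (the interval halves each step)
def bsearchB (thresholds : List Int) (price : Int) : Nat → Nat → Nat → Nat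
  | 0, lo, _ => lo
  | fuel + 1, lo, hi =>
    if lo < hi then
      let mid := (lo + hi) / 2
      if price < thresholds.getD mid 0 then bsearchB thresholds price fuel lo mid
      else bsearchB thresholds price fuel (mid + 1) hi
    else lo

def get_tick_size_alt (price : Int) : Int :=
  let thresholds : List Int := [2000, 5000, 10000, 20000, 50000, 100000, 200000]
  let values : List Int := [1, 5, 10, 10, 50, 100, 100, 500]
  values.getD (bsearchB thresholds price thresholds.length 0 thresholds.length) 0

-- ===== PRECONDITION & SPEC =====
def Spec_get_tick_size (price : Int) (out : Int) : Prop := out = get_tick_size_alt price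
instance (price : Int) (out : Int) : Decidable (Spec_get_tick_size price out) := by unfold Spec_get_tick_size; infer_instance

-- ===== CLAIM (what is proved, stated in full; the proofs are below) =====
def Claim_equal_get_tick_size : Prop := ∀ (price : Int), Dom_get_tick_size price → Spec_get_tick_size price (get_tick_size price)

-- ===== LEMMAS AND PROOFS =====

-- ===== VERDICT (by name: the statement is the Claim_ definition above) =====
set_option maxHeartbeats 1000000 in
theorem get_tick_size_spec : Claim_equal_get_tick_size := by
  intro price _
  unfold Spec_get_tick_size get_tick_size get_tick_size_alt
  have hk : PySem.List.sorted (PySem.Dict.keys (PySem.Dict.ofList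
      [((2000:Int), (1:Int)), (5000, 5), (10000, 10), (20000, 10), (50000, 50), (100000, 100), (200000, 100)])) id
      = [2000, 5000, 10000, 20000, 50000, 100000, 200000] := by decide
  simp only [hk, List.length]
  rcases lt_or_ge price 2000 with h0 | h0
  · simp [tickLoop, bsearchB, show price < 2000 from by omega, show price < 5000 from by omega, show price < 20000 from by omega]; decide
  rcases lt_or_ge price 5000 with h1 | h1
  · simp [tickLoop, bsearchB, show ¬ price < 2000 from by omega, show price < 5000 from by omega, show price < 20000 from by omega]; decide
  rcases lt_or_ge price 10000 with h2 | h2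
  · simp [tickLoop, bsearchB, show ¬ price < 2000 from by omega, show ¬ price < 5000 from by omega, show price < 10000 from by omega, show price < 20000 from by omega]; decide
  rcases lt_or_ge price 20000 with h3 | h3
  · simp [tickLoop, bsearchB, show ¬ price < 2000 from by omega, show ¬ price < 5000 from by omega, show ¬ price < 10000 from by omega, show price < 20000 from by omega]; decide
  rcases lt_or_ge price 50000 with h4 | h4
  · simp [tickLoop, bsearchB, show ¬ price < 2000 from by omega, show ¬ price < 5000 from by omega, show ¬ price < 10000 from by omega, show ¬ price < 20000 from by omega, show price < 50000 from by omega, show price < 100000 from by omega]; decide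
  rcases lt_or_ge price 100000 with h5 | h5
  · simp [tickLoop, bsearchB, show ¬ price < 2000 from by omega, show ¬ price < 5000 from by omega, show ¬ price < 10000 from by omega, show ¬ price < 20000 from by omega, show ¬ price < 50000 from by omega, show price < 100000 from by omega]; decide
  rcases lt_or_ge price 200000 with h6 | h6
  · simp [tickLoop, bsearchB, show ¬ price < 2000 from by omega, show ¬ price < 5000 from by omega, show ¬ price < 10000 from by omega, show ¬ price < 20000 from by omega, show ¬ price < 50000 from by omega, show ¬ price < 100000 from by omega, show price < 200000 from by omega]; decide
  simp [tickLoop, bsearchB, show ¬ price < 2000 from by omega, show ¬ price < 5000 from by omega, show ¬ price < 10000 from by omega, show ¬ price < 20000 from by omega, show ¬ price < 50000 from by omega, show ¬ price < 100000 from by omega, show ¬ price < 200000 from by omega]
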